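-- pv_equiv track=rewrite | github.com/annikasmadsen/Anholt-faergefart | checker.py | _find_best_api_url
-- ===== SOURCE A (Python) =====
-- from typing import Optional
--
-- def _find_best_api_url(responses: list) -> Optional[str]:
--     """Finder bedste API-URL til direkte genbrug i fremtidige kørsler."""
--     keywords = ["timetable", "departure", "afgang", "sejlplan", "availability"]
--     for item in responses:
--         if any(k in item["url"].lower() for k in keywords):
--             return item["url"]
--     for item in responses:
--         if "api.teambooking.dk" in item["url"]:
--             return item["url"]
--     return None
-- ===== SOURCE B (Python) =====
-- def _find_best_api_url(responses: list):
--     """Finder bedste API-URL til direkte genbrug i fremtidige koersler."""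
--     keywords = ["timetable", "departure", "afgang", "sejlplan", "availability"]
--     candidate = None
--     for item in responses:
--         url = item["url"]
--         low = url.lower()
--         if any(k in low for k in keywords):
--             return url
--         if candidate is None and "api.teambooking.dk" in url:
--             candidate = url
--     return candidate
-- ===== Notes on version B (the rewrite author's own statement) =====
-- stated objective: simpler
-- what changed: The two sequential scans of responses are fused into a single pass that returns a keyword match immediately and otherwise remembers the first teambooking URL as a candidate returned after the loop.
import Mathlib
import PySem

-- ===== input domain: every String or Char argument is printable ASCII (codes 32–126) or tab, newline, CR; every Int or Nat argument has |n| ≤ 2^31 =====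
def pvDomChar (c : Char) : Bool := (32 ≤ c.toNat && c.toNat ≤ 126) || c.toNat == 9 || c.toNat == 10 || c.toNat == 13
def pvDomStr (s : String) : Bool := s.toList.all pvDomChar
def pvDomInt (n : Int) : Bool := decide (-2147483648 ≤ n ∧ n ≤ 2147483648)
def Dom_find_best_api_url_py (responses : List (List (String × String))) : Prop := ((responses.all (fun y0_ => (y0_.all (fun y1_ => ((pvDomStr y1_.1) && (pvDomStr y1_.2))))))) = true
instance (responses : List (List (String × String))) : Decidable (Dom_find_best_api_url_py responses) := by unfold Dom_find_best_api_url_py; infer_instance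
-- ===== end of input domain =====

-- B fuses A's two scans into one pass that returns a keyword match at once and otherwise
-- remembers the first teambooking URL (objective: simpler; return value only, no mutation).

-- ===== PORT A =====
def pvKeywords : List String := ["timetable", "departure", "afgang", "sejlplan", "availability"]

-- item["url"]; Pre_ guarantees the key is present, so the default is never used inside Pre_
def pvUrl (item : List (String × String)) : String := (PySem.Dict.get? ⟨item⟩ "url").getD ""

def pvKwMatch (u : String) : Bool := pvKeywords.any (fun k => PySem.Str.isIn k (PySem.Str.lower u))

-- first loop of A
def pvPass1 : List (List (String × String)) → Option String
  | [] => none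
  | item :: rest => if pvKwMatch (pvUrl item) then some (pvUrl item) else pvPass1 rest

-- second loop of A
def pvPass2 : List (List (String × String)) → Option String
  | [] => none
  | item :: rest =>
      if PySem.Str.isIn "api.teambooking.dk" (pvUrl item) then some (pvUrl item) else pvPass2 rest

def find_best_api_url_py (responses : List (List (String × String))) : Option String :=
  match pvPass1 responses with
  | some u => some u
  | none => pvPass2 responses

-- ===== PORT B =====
-- single loop carrying the candidate
def pvLoopB : Option String → List (List (String × String)) → Option String
  | cand, [] => cand
  | cand, item :: rest =>
      let url := pvUrl item
      if pvKwMatch url then some url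
      else pvLoopB (if cand.isNone && PySem.Str.isIn "api.teambooking.dk" url then some url else cand) rest

def find_best_api_url_py_alt (responses : List (List (String × String))) : Option String :=
  pvLoopB none responses

-- ===== PRECONDITION & SPEC =====
-- Pre_ excludes exactly the inputs where the Python raises KeyError: some item lacks the key
-- "url" and no earlier item's url contains a keyword (so the scan reaches the missing key).
def Pre_find_best_api_url_py (responses : List (List (String × String))) : Prop :=
  ∀ i : Fin responses.length,
    PySem.Dict.contains (⟨responses.get i⟩ : PySem.Dict String String) "url" = false →
      ∃ j : Fin responses.length, (j : Nat) < (i : Nat) ∧ pvKwMatch (pvUrl (responses.get j)) = true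
instance (responses : List (List (String × String))) : Decidable (Pre_find_best_api_url_py responses) := by unfold Pre_find_best_api_url_py; infer_instance

def pvWitness_find_best_api_url_py : (List (List (String × String))) :=
  [[("url", "http://api.teambooking.dk/a")], [("url", "http://x/timetable")]]

def Spec_find_best_api_url_py (responses : List (List (String × String))) (out : Option String) : Prop := out = find_best_api_url_py_alt responses
instance (responses : List (List (String × String))) (out : Option String) : Decidable (Spec_find_best_api_url_py responses out) := by unfold Spec_find_best_api_url_py; infer_instance

-- ===== CLAIM (what is proved, stated in full; the proofs are below) =====
def Claim_equal_find_best_api_url_py : Prop := ∀ (responses : List (List (String × String))), Dom_find_best_api_url_py responses → Pre_find_best_api_url_py responses → Spec_find_best_api_url_py responses (find_best_api_url_py responses)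

-- ===== LEMMAS AND PROOFS =====
-- loop invariant: B's fused loop equals A's first pass, falling back to the candidate, then A's second pass
theorem pvLoopB_eq (rs : List (List (String × String))) :
    ∀ cand : Option String,
      pvLoopB cand rs =
        match pvPass1 rs with
        | some u => some u
        | none => match cand with
                  | some c => some c
                  | none => pvPass2 rs := by
  induction rs with
  | nil => intro cand; cases cand <;> simp [pvLoopB, pvPass1, pvPass2]
  | cons item rest ih =>
      intro cand
      by_cases hk : pvKwMatch (pvUrl item) = true
      · cases cand <;> simp [pvLoopB, pvPass1, hk]
      · have hk' : pvKwMatch (pvUrl item) = false := by simpa using hk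
        cases cand with
        | some c => simp [pvLoopB, pvPass1, hk', ih]
        | none =>
            simp only [pvLoopB, pvPass1, pvPass2, hk', ih, Bool.false_eq_true, if_false,
              Option.isNone_none, Bool.true_and]
            cases PySem.Str.isIn "api.teambooking.dk" (pvUrl item) <;>
              cases pvPass1 rest <;> simp

-- ===== VERDICT (by name: the statement is the Claim_ definition above) =====
theorem find_best_api_url_py_spec : Claim_equal_find_best_api_url_py := by
  intro responses _ _
  unfold Spec_find_best_api_url_py find_best_api_url_py find_best_api_url_py_alt
  rw [pvLoopB_eq]
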